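-- pv_equiv track=rewrite | github.com/El-Psy-Kongrooo/AdventCode24 | day2/part1/day2_1part.py | getIncDecList
-- ===== SOURCE A (Python) =====
-- def getIncDecList(reportList):
--     incOrdecList = []
--     for lst in reportList:
--         isIncreasing = None
--         flag = True
--         for d in range(len(lst) - 1):
--             if lst[d] < lst[d + 1]:
--                 if isIncreasing is None:
--                     isIncreasing = True
--                 elif not isIncreasing:
--                     flag = False
--                     break
--             elif lst[d] > lst[d + 1]:
--                 if isIncreasing is None:
--                     isIncreasing = False
--                 elif isIncreasing:
--                     flag = False
--                     break
--         if flag: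
--             incOrdecList.append(lst)
--     return incOrdecList
-- ===== SOURCE B (Python) =====
-- def getIncDecList(reportList):
--     return [lst for lst in reportList
--             if lst == sorted(lst) or lst == sorted(lst, reverse=True)]
-- ===== Notes on version B (the rewrite author's own statement) =====
-- stated objective: simpler
-- what changed: Replaces A's direction-tracking adjacent-pair scan (flag/isIncreasing state machine with break) by a one-line sort-and-compare filter: keep lst iff it equals sorted(lst) or sorted(lst, reverse=True).
import Mathlib
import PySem

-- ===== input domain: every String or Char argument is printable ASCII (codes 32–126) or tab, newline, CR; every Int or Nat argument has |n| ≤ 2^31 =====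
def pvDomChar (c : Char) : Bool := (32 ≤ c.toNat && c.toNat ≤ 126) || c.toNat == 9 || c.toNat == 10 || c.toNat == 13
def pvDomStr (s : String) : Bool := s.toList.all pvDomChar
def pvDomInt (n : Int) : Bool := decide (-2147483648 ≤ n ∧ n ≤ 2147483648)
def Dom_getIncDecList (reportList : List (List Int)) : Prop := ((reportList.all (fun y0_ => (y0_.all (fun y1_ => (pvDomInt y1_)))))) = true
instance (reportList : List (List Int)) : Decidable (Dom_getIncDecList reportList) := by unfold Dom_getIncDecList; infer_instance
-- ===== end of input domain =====

-- B replaces A's direction-tracking adjacent-pair scan (isIncreasing/flag state machine with break)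
-- by a sort-and-compare filter: keep lst iff lst == sorted(lst) or lst == sorted(lst, reverse=True); simpler.


-- ===== PORT A =====
-- A's inner index loop 'for d in range(len(lst)-1)' over adjacent pairs, with its
-- isIncreasing : Option Bool state and the break (= returning false), as structural
-- recursion over the same adjacent pairs.
def aScan : List Int → Option Bool → Bool
  | x :: y :: rest, inc =>
    if x < y then
      match inc with
      | none => aScan (y :: rest) (some true)
      | some true => aScan (y :: rest) (some true)
      | some false => false          -- flag = False; break
    else if y < x then               -- lst[d] > lst[d+1]
      match inc with
      | none => aScan (y :: rest) (some false)
      | some false => aScan (y :: rest) (some false)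
      | some true => false           -- flag = False; break
    else aScan (y :: rest) inc
  | _, _ => true

def getIncDecList (reportList : List (List Int)) : List (List Int) :=
  reportList.foldl (fun incOrdecList lst =>
    if aScan lst none then incOrdecList ++ [lst] else incOrdecList) []

-- ===== PORT B =====
def getIncDecList_alt (reportList : List (List Int)) : List (List Int) :=
  reportList.filter (fun lst =>
    lst == PySem.List.sorted lst (fun x => x) false ||
    lst == PySem.List.sorted lst (fun x => x) true)

-- ===== PRECONDITION & SPEC =====
def Spec_getIncDecList (reportList : List (List Int)) (out : List (List Int)) : Prop := out = getIncDecList_alt reportList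
instance (reportList : List (List Int)) (out : List (List Int)) : Decidable (Spec_getIncDecList reportList out) := by unfold Spec_getIncDecList; infer_instance

-- ===== CLAIM (what is proved, stated in full; the proofs are below) =====
def Claim_equal_getIncDecList : Prop := ∀ (reportList : List (List Int)), Dom_getIncDecList reportList → Spec_getIncDecList reportList (getIncDecList reportList)

-- ===== LEMMAS AND PROOFS =====

-- A's scan with a committed direction checks the corresponding adjacent chain.
theorem aScan_some_true (lst : List Int) : aScan lst (some true) = true ↔ lst.IsChain (· ≤ ·) := by
  induction lst with
  | nil => simp [aScan]
  | cons x t ih =>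
    cases t with
    | nil => simp [aScan]
    | cons y r =>
      by_cases h1 : x < y
      · simp [aScan, h1, ih, List.isChain_cons_cons, le_of_lt h1]
      · by_cases h2 : y < x
        · simp [aScan, h1, h2, List.isChain_cons_cons, not_le.mpr h2]
        · have hxy : x = y := le_antisymm (not_lt.mp h2) (not_lt.mp h1)
          subst hxy
          simp [aScan, ih, List.isChain_cons_cons]

theorem aScan_some_false (lst : List Int) : aScan lst (some false) = true ↔ lst.IsChain (fun a b => b ≤ a) := by
  induction lst with
  | nil => simp [aScan]
  | cons x t ih =>
    cases t with
    | nil => simp [aScan]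
    | cons y r =>
      by_cases h1 : x < y
      · simp [aScan, h1, List.isChain_cons_cons, not_le.mpr h1]
      · by_cases h2 : y < x
        · simp [aScan, h1, h2, ih, List.isChain_cons_cons, le_of_lt h2]
        · have hxy : x = y := le_antisymm (not_lt.mp h2) (not_lt.mp h1)
          subst hxy
          simp [aScan, ih, List.isChain_cons_cons]

theorem aScan_none (lst : List Int) :
    aScan lst none = true ↔ (lst.IsChain (· ≤ ·) ∨ lst.IsChain (fun a b => b ≤ a)) := by
  induction lst with
  | nil => simp [aScan]
  | cons x t ih =>
    cases t with
    | nil => simp [aScan]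
    | cons y r =>
      by_cases h1 : x < y
      · simp [aScan, h1, aScan_some_true, List.isChain_cons_cons, le_of_lt h1, not_le.mpr h1]
      · by_cases h2 : y < x
        · simp [aScan, h1, h2, aScan_some_false, List.isChain_cons_cons, le_of_lt h2, not_le.mpr h2]
        · have hxy : x = y := le_antisymm (not_lt.mp h2) (not_lt.mp h1)
          subst hxy
          simp [aScan, ih, List.isChain_cons_cons]

-- B's membership test equals the same chain condition: lst == sorted(lst) tests weak increase,
-- lst == sorted(lst, reverse=True) tests weak decrease.
theorem sorted_asc_eq_iff (lst : List Int) :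
    PySem.List.sorted lst (fun x => x) false = lst ↔ lst.Pairwise (· ≤ ·) := by
  constructor
  · intro h
    have hp := PySem.List.sorted_pairwise lst (fun x => x) (κ := Int)
    rw [h] at hp
    exact hp
  · intro h
    exact PySem.List.sorted_eq_self_of_pairwise lst (fun x => x) h

theorem sorted_desc_eq_iff (lst : List Int) :
    PySem.List.sorted lst (fun x => x) true = lst ↔ lst.Pairwise (fun a b => b ≤ a) := by
  constructor
  · intro h
    have hp := PySem.List.sorted_pairwise_rev lst (fun x => x) (κ := Int)
    rw [h] at hp
    exact hp
  · intro h
    exact PySem.List.sorted_rev_eq_self_of_pairwise lst (fun x => x) h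

theorem predicates_agree (lst : List Int) :
    aScan lst none =
      (lst == PySem.List.sorted lst (fun x => x) false ||
       lst == PySem.List.sorted lst (fun x => x) true) := by
  rcases hb : aScan lst none with _ | _
  · have hb' : ¬ (lst.IsChain (· ≤ ·) ∨ lst.IsChain (fun a b => b ≤ a)) := by
      rw [← aScan_none, hb]; simp
    push Not at hb'
    simp only [Bool.false_eq, Bool.or_eq_false_iff, beq_eq_false_iff_ne, ne_eq]
    constructor
    · intro h
      have := (sorted_asc_eq_iff lst).mp h.symm
      rw [List.isChain_iff_pairwise] at hb'
      exact hb'.1 this |>.elim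
    · intro h
      have := (sorted_desc_eq_iff lst).mp h.symm
      have hb2 := hb'.2
      rw [List.isChain_iff_pairwise] at hb2
      exact hb2 this |>.elim
  · rw [aScan_none] at hb
    rcases hb with hb | hb
    · rw [List.isChain_iff_pairwise] at hb
      have := (sorted_asc_eq_iff lst).mpr hb
      simp [this]
    · rw [List.isChain_iff_pairwise] at hb
      have := (sorted_desc_eq_iff lst).mpr hb
      simp [this]

-- ===== VERDICT (by name: the statement is the Claim_ definition above) =====
theorem getIncDecList_spec : Claim_equal_getIncDecList := by
  intro reportList _
  unfold Spec_getIncDecList getIncDecList getIncDecList_alt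
  have := PySem.List.foldl_append_if (fun lst => aScan lst none) (fun lst => lst)
    reportList ([] : List (List Int))
  simp only [List.nil_append, List.map_id'] at this
  rw [this]
  exact List.filter_congr (fun lst _ => predicates_agree lst)
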